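-- pv_equiv track=rewrite | github.com/loserrain/UVa-1 | 706/lc.py | print_2
-- ===== SOURCE A (Python) =====
-- def init_grid(s):
--     grid = []
--     for i in range(2*s + 3):
--         grid.append([' '] * (s+2))
--
--     return grid
--
-- def print_2(s):
--     grid = init_grid(s)
--     for i in [0, s+1, -1]:
--         for j in range(1, s+1):
--             grid[i][j] = '-'
--
--     for i in range(1, s+1):
--         grid[i][-1] = '|'
--
--     for i in range(s+2, 2*s + 2):
--         grid[i][0] = '|'
--
--     return grid
-- ===== SOURCE B (Python) =====
-- def print_2(s):
--     if s < 1: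
--         # too small for any stroke: every row is blank
--         return [[' '] * (s + 2) for _ in range(2 * s + 3)]
--     bar = [' '] + ['-'] * s + [' ']
--     grid = []
--     for i in range(2 * s + 3):
--         if i == 0 or i == s + 1 or i == 2 * s + 2:
--             grid.append(bar[:])
--         elif i <= s:
--             grid.append([' '] * (s + 1) + ['|'])
--         else:
--             grid.append(['|'] + [' '] * (s + 1))
--     return grid
-- ===== Notes on version B (the rewrite author's own statement) =====
-- stated objective: simpler
-- what changed: B drops the blank-canvas-then-mutate design (init a grid of spaces, then three in-place painting passes) and instead emits the grid in one pass, building each row directly from its row index out of whole-row segments (bar row, upper-body row, lower-body row, blank).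
import Mathlib
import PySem

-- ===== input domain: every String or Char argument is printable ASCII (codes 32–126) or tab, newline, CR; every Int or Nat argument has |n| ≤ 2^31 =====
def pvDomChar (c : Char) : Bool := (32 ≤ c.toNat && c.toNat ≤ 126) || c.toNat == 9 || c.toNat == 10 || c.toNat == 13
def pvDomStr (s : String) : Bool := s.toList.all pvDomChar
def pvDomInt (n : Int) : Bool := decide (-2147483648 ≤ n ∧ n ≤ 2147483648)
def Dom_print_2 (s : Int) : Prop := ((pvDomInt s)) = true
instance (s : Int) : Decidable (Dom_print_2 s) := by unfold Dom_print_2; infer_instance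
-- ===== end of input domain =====

-- B replaces A's blank-canvas-then-paint mutation passes by computing every cell directly
-- from its row/column index in one comprehension (objective: simpler; same asymptotic cost).

-- ===== PORT A =====
-- for i in range(2*s+3): grid.append([' '] * (s+2))
def init_grid (s : Int) : List (List String) :=
  (PySem.List.pyRange 0 (2*s+3) 1).foldl
    (fun g _ => g ++ [List.replicate (s+2).toNat " "]) []

-- the three mutation passes, innermost first: dash rows [0, s+1, -1], then the
-- right vertical (rows 1..s, col -1), then the left vertical (rows s+2..2s+1, col 0).
-- grid[i][j] = c  is  pySetD g i (pySetD (pyGetD g i []) j c); all indices A uses are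
-- in range whenever the loop runs, so pySetD/pyGetD are exact here.
def print_2 (s : Int) : List (List String) :=
  (PySem.List.pyRange (s+2) (2*s+2) 1).foldl
    (fun g i => PySem.List.pySetD g i (PySem.List.pySetD (PySem.List.pyGetD g i []) 0 "|"))
    ((PySem.List.pyRange 1 (s+1) 1).foldl
      (fun g i => PySem.List.pySetD g i (PySem.List.pySetD (PySem.List.pyGetD g i []) (-1) "|"))
      ([0, s+1, -1].foldl
        (fun g i => (PySem.List.pyRange 1 (s+1) 1).foldl
          (fun g j => PySem.List.pySetD g i
            (PySem.List.pySetD (PySem.List.pyGetD g i []) j "-")) g)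
        (init_grid s)))

-- ===== PORT B =====
-- every row is produced directly from its row index i: bar rows at 0, s+1, 2*s+2,
-- upper-body rows 1..s, lower-body rows s+2..2s+1; for s < 1 nothing is drawn.
def print_2_alt (s : Int) : List (List String) :=
  if s < 1 then
    (PySem.List.pyRange 0 (2*s+3) 1).map (fun _ => List.replicate (s+2).toNat " ")
  else
    (PySem.List.pyRange 0 (2*s+3) 1).map (fun i =>
      if i = 0 ∨ i = s + 1 ∨ i = 2*s + 2 then [" "] ++ List.replicate s.toNat "-" ++ [" "]
      else if i ≤ s then List.replicate (s+1).toNat " " ++ ["|"]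
      else ["|"] ++ List.replicate (s+1).toNat " ")

-- ===== PRECONDITION & SPEC =====
def Spec_print_2 (s : Int) (out : List (List String)) : Prop := out = print_2_alt s
instance (s : Int) (out : List (List String)) : Decidable (Spec_print_2 s out) := by
  unfold Spec_print_2; infer_instance

-- ===== CLAIM =====
def Claim_equal_print_2 : Prop := ∀ (s : Int), Dom_print_2 s → Spec_print_2 s (print_2 s)

-- ===== LEMMAS AND PROOFS =====

-- pySetD at a nonnegative index on a map-over-range grid is a pointwise function update
theorem setMap {α : Type} (h : Int) (f : Int → α) (k : Int) (v : α) (hk0 : 0 ≤ k) :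
    PySem.List.pySetD ((PySem.List.pyRange 0 h 1).map f) k v
      = (PySem.List.pyRange 0 h 1).map (fun i => if i = k then v else f i) := by
  rw [PySem.List.pySetD_of_nonneg _ v hk0]
  apply List.ext_getElem
  · simp
  · intro n h1 h2
    simp [PySem.List.pyRange_one] at h1 ⊢
    rw [List.getElem_set]
    split <;> rename_i hc
    · rw [if_pos (by omega)]
    · rw [if_neg (by omega)]
      simp

-- pySetD at index -1 updates position h-1
theorem setMapNeg {α : Type} (h : Int) (f : Int → α) (v : α) (hh : 0 < h) :
    PySem.List.pySetD ((PySem.List.pyRange 0 h 1).map f) (-1) v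
      = (PySem.List.pyRange 0 h 1).map (fun i => if i = h - 1 then v else f i) := by
  have hidx : PySem.List.pyIdx? h.toNat (-1) = some (h.toNat - 1) := by
    simp [PySem.List.pyIdx?]
    omega
  have hs : PySem.List.pySetD ((PySem.List.pyRange 0 h 1).map f) (-1) v
      = ((PySem.List.pyRange 0 h 1).map f).set (h-1).toNat v := by
    simp [PySem.List.pySetD, PySem.List.pySet?, hidx]
  rw [hs, ← PySem.List.pySetD_of_nonneg _ v (show (0:Int) ≤ h-1 by omega),
     setMap h f (h-1) v (by omega)]

-- pyGetD at index -1 on a map-over-range grid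
theorem getMapNeg {α : Type} (h : Int) (f : Int → α) (d : α) (hh : 0 < h) :
    PySem.List.pyGetD ((PySem.List.pyRange 0 h 1).map f) (-1) d = f (h - 1) := by
  have hl : ((PySem.List.pyRange 0 h 1).map f).length = h.toNat := by
    simp [PySem.List.pyRange_one]
  rw [PySem.List.pyGetD_neg_ofNat _ 1 d (by omega) (by omega)]
  simp [PySem.List.pyRange_one]
  congr 1
  omega

-- a read-modify-write pass whose written index runs over pyRange a b 1
theorem foldIdAux {α : Type} (d : α) (u : Int → α → α) (h : Int) :
    ∀ (n : Nat) (a b : Int) (f : Int → α), (b - a).toNat = n → 0 ≤ a → b ≤ h →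
    (PySem.List.pyRange a b 1).foldl
        (fun g i => PySem.List.pySetD g i (u i (PySem.List.pyGetD g i d)))
        ((PySem.List.pyRange 0 h 1).map f)
      = (PySem.List.pyRange 0 h 1).map (fun i => if a ≤ i ∧ i < b then u i (f i) else f i) := by
  intro n
  induction n with
  | zero =>
    intro a b f hn ha hb
    have he : PySem.List.pyRange a b 1 = [] := by
      rw [PySem.List.pyRange_one]
      simp [hn]
    rw [he]
    simp only [List.foldl_nil]
    apply List.map_congr_left
    intro i _
    rw [if_neg (by omega)]
  | succ n ih =>
    intro a b f hn ha hb
    have hab : a < b := by omega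
    rw [PySem.List.pyRange_one_cons hab]
    simp only [List.foldl_cons]
    rw [PySem.List.pyGetD_map_pyRange_of_nonneg f h a d ha (by omega),
        setMap h f a (u a (f a)) ha,
        ih (a+1) b _ (by omega) (by omega) hb]
    apply List.map_congr_left
    intro i hi
    rw [PySem.List.mem_pyRange_one] at hi
    by_cases hia : i = a
    · subst hia
      rw [if_neg (by omega), if_pos rfl, if_pos (by omega)]
    · rw [show (if i = a then u a (f a) else f i) = f i from if_neg hia]
      by_cases hc : a + 1 ≤ i ∧ i < b
      · rw [if_pos hc, if_pos (by omega)]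
      · rw [if_neg hc, if_neg (by omega)]

theorem foldId {α : Type} (d : α) (u : Int → α → α) (h a b : Int) (f : Int → α)
    (ha : 0 ≤ a) (hb : b ≤ h) :
    (PySem.List.pyRange a b 1).foldl
        (fun g i => PySem.List.pySetD g i (u i (PySem.List.pyGetD g i d)))
        ((PySem.List.pyRange 0 h 1).map f)
      = (PySem.List.pyRange 0 h 1).map (fun i => if a ≤ i ∧ i < b then u i (f i) else f i) :=
  foldIdAux d u h (b - a).toNat a b f rfl ha hb

-- a read-modify-write pass that always hits the fixed row i0
theorem foldConst {α : Type} (d : α) (u : Int → α → α) (h i0 : Int)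
    (hi0 : 0 ≤ i0) (hi1 : i0 < h) :
    ∀ (L : List Int) (f : Int → α),
    L.foldl (fun g j => PySem.List.pySetD g i0 (u j (PySem.List.pyGetD g i0 d)))
        ((PySem.List.pyRange 0 h 1).map f)
      = (PySem.List.pyRange 0 h 1).map
          (fun i => if i = i0 then L.foldl (fun r j => u j r) (f i0) else f i) := by
  intro L
  induction L with
  | nil =>
    intro f
    simp only [List.foldl_nil]
    apply List.map_congr_left
    intro i _
    by_cases hi : i = i0
    · subst hi; rw [if_pos rfl]
    · rw [if_neg hi]
  | cons j L ih =>
    intro f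
    simp only [List.foldl_cons]
    rw [PySem.List.pyGetD_map_pyRange_of_nonneg f h i0 d hi0 hi1,
        setMap h f i0 (u j (f i0)) hi0, ih]
    apply List.map_congr_left
    intro i _
    by_cases hi : i = i0
    · subst hi
      rw [if_pos rfl, if_pos rfl, if_pos rfl]
    · rw [if_neg hi, if_neg hi, if_neg hi]

-- same, hitting row -1 (= h-1)
theorem foldNeg {α : Type} (d : α) (u : Int → α → α) (h : Int) (hh : 0 < h) :
    ∀ (L : List Int) (f : Int → α),
    L.foldl (fun g j => PySem.List.pySetD g (-1) (u j (PySem.List.pyGetD g (-1) d)))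
        ((PySem.List.pyRange 0 h 1).map f)
      = (PySem.List.pyRange 0 h 1).map
          (fun i => if i = h - 1 then L.foldl (fun r j => u j r) (f (h-1)) else f i) := by
  intro L
  induction L with
  | nil =>
    intro f
    simp only [List.foldl_nil]
    apply List.map_congr_left
    intro i _
    by_cases hi : i = h - 1
    · subst hi; rw [if_pos rfl]
    · rw [if_neg hi]
  | cons j L ih =>
    intro f
    simp only [List.foldl_cons]
    rw [getMapNeg h f d hh, setMapNeg h f (u j (f (h-1))) hh, ih]
    apply List.map_congr_left
    intro i _
    by_cases hi : i = h - 1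
    · subst hi
      rw [if_pos rfl, if_pos rfl, if_pos rfl]
    · rw [if_neg hi, if_neg hi, if_neg hi]

theorem rowSplit (s : Int) (hs : 1 ≤ s) :
    PySem.List.pyRange 0 (s+2) 1 = [0] ++ PySem.List.pyRange 1 (s+1) 1 ++ [s+1] := by
  rw [PySem.List.pyRange_one_cons (by omega : (0:Int) < s+2),
      show (0:Int)+1 = 1 by ring, show s+2 = (s+1)+1 by ring,
      PySem.List.pyRange_one_succ_right (by omega : (1:Int) ≤ s+1)]
  rfl

theorem midConst {α : Type} (s : Int) (f : Int → α) (c : α)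
    (hf : ∀ j : Int, 1 ≤ j → j < s + 1 → f j = c) :
    (PySem.List.pyRange 1 (s+1) 1).map f = List.replicate (s+1-1).toNat c := by
  rw [← PySem.List.length_pyRange_one 1 (s+1), ← List.map_const']
  apply List.map_congr_left
  intro j hj
  rw [PySem.List.mem_pyRange_one] at hj
  exact hf j hj.1 hj.2

theorem rowBar (s : Int) (hs : 1 ≤ s) :
    (PySem.List.pyRange 0 (s+2) 1).map (fun j => if 1 ≤ j ∧ j < s + 1 then "-" else " ")
      = [" "] ++ List.replicate s.toNat "-" ++ [" "] := by
  rw [rowSplit s hs]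
  simp only [List.map_append]
  rw [midConst s _ "-" (fun j h1 h2 => if_pos ⟨h1, h2⟩)]
  simp only [List.map_cons, List.map_nil]
  rw [if_neg (by omega), if_neg (by omega), show ((s:Int)+1-1).toNat = s.toNat by omega]

theorem rowUp (s : Int) (hs : 1 ≤ s) :
    (PySem.List.pyRange 0 (s+2) 1).map (fun j => if j = s + 2 - 1 then "|" else " ")
      = List.replicate (s+1).toNat " " ++ ["|"] := by
  rw [rowSplit s hs]
  simp only [List.map_append]
  rw [midConst s _ " " (fun j h1 h2 => if_neg (by omega))]
  simp only [List.map_cons, List.map_nil]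
  rw [if_neg (by omega), if_pos (by omega)]
  rw [show ((s:Int)+1).toNat = 1 + (s+1-1).toNat by omega]
  rw [List.replicate_add]
  rfl

theorem rowLow (s : Int) (hs : 1 ≤ s) :
    (PySem.List.pyRange 0 (s+2) 1).map (fun j => if j = 0 then "|" else " ")
      = ["|"] ++ List.replicate (s+1).toNat " " := by
  rw [rowSplit s hs]
  simp only [List.map_append]
  rw [midConst s _ " " (fun j h1 h2 => if_neg (by omega))]
  simp only [List.map_cons, List.map_nil]
  rw [if_pos trivial, if_neg (by omega)]
  rw [show ((s:Int)+1).toNat = (s+1-1).toNat + 1 by omega]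
  rw [List.replicate_add]
  simp

theorem main_pos (s : Int) (hs : 1 ≤ s) : print_2 s = print_2_alt s := by
  have hg0 : init_grid s
      = (PySem.List.pyRange 0 (2*s+3) 1).map
          (fun _ => (PySem.List.pyRange 0 (s+2) 1).map (fun _ => " ")) := by
    unfold init_grid
    rw [PySem.List.foldl_append_singleton_eq_map (fun _ => List.replicate (s+2).toNat " ")]
    simp [PySem.List.pyRange_one]
    intro a _
    rw [show ((fun (_ : Int) => " ") ∘ fun (k : Nat) => (k : Int)) = (fun (_ : Nat) => " ") from rfl,
        List.map_const']
    simp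
  unfold print_2
  rw [hg0]
  simp only [List.foldl_cons, List.foldl_nil]
  rw [foldConst [] (fun j x => PySem.List.pySetD x j "-") (2*s+3) 0 (by omega) (by omega),
      foldConst [] (fun j x => PySem.List.pySetD x j "-") (2*s+3) (s+1) (by omega) (by omega),
      foldNeg [] (fun j x => PySem.List.pySetD x j "-") (2*s+3) (by omega),
      foldId [] (fun _ x => PySem.List.pySetD x (-1) "|") (2*s+3) 1 (s+1) _ (by omega) (by omega),
      foldId [] (fun _ x => PySem.List.pySetD x 0 "|") (2*s+3) (s+2) (2*s+2) _ (by omega) (by omega)]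
  unfold print_2_alt
  rw [if_neg (show ¬ s < 1 by omega)]
  apply List.map_congr_left
  intro i hi
  rw [PySem.List.mem_pyRange_one] at hi
  rw [show (2*s+3-1 : Int) = 2*s+2 by ring,
      if_neg (show ¬((s:Int)+1 = 0) by omega),
      if_neg (show ¬(2*s+2 : Int) = s+1 by omega),
      if_neg (show ¬(2*s+2 : Int) = 0 by omega),
      foldId " " (fun _ _ => "-") (s+2) 1 (s+1) (fun _ => " ") (by omega) (by omega)]
  by_cases hL : s + 2 ≤ i ∧ i < 2*s+2
  · -- left vertical rows s+2 .. 2s+1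
    rw [if_pos hL, if_neg (show ¬(1 ≤ i ∧ i < s+1) by omega),
        if_neg (show ¬i = 2*s+2 by omega), if_neg (show ¬i = s+1 by omega),
        if_neg (show ¬i = 0 by omega),
        setMap (s+2) (fun _ => " ") 0 "|" (by omega),
        if_neg (show ¬(i = 0 ∨ i = s+1 ∨ i = 2*s+2) by omega),
        if_neg (show ¬ i ≤ s by omega)]
    exact rowLow s hs
  · rw [if_neg hL]
    by_cases hR : 1 ≤ i ∧ i < s+1
    · -- right vertical rows 1 .. s
      rw [if_pos hR, if_neg (show ¬i = 2*s+2 by omega), if_neg (show ¬i = s+1 by omega),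
          if_neg (show ¬i = 0 by omega),
          setMapNeg (s+2) (fun _ => " ") "|" (by omega),
          if_neg (show ¬(i = 0 ∨ i = s+1 ∨ i = 2*s+2) by omega),
          if_pos (show i ≤ s by omega)]
      exact rowUp s hs
    · rw [if_neg hR]
      -- the three dash rows: i ∈ {0, s+1, 2s+2}
      have hi3 : i = 2*s+2 ∨ i = s+1 ∨ i = 0 := by omega
      have hbar : (if i = 0 ∨ i = s + 1 ∨ i = 2*s + 2 then
            [" "] ++ List.replicate s.toNat "-" ++ [" "]
          else if i ≤ s then List.replicate (s+1).toNat " " ++ ["|"]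
          else ["|"] ++ List.replicate (s+1).toNat " ")
          = [" "] ++ List.replicate s.toNat "-" ++ [" "] := by
        rw [if_pos (by omega)]
      rcases hi3 with h3 | h3 | h3
      · rw [if_pos h3, hbar]
        exact rowBar s hs
      · rw [if_neg (show ¬i = 2*s+2 by omega), if_pos h3, hbar]
        exact rowBar s hs
      · rw [if_neg (show ¬i = 2*s+2 by omega), if_neg (show ¬i = s+1 by omega), if_pos h3, hbar]
        exact rowBar s hs

theorem main_eq (s : Int) : print_2 s = print_2_alt s := by
  rcases le_or_gt 1 s with h | h
  · exact main_pos s h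
  · rcases le_or_gt s (-2) with h2 | h2
    · have e1 : PySem.List.pyRange 0 (2*s+3) 1 = [] := by
        rw [PySem.List.pyRange_one]
        simp
        omega
      have e2 : PySem.List.pyRange 1 (s+1) 1 = [] := by
        rw [PySem.List.pyRange_one]
        simp
        omega
      have e3 : PySem.List.pyRange (s+2) (2*s+2) 1 = [] := by
        rw [PySem.List.pyRange_one]
        simp
        omega
      simp [print_2, print_2_alt, init_grid, e1, e2, e3]
    · interval_cases s
      · decide
      · decide

-- ===== VERDICT =====
theorem print_2_spec : Claim_equal_print_2 := by
  intro s _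
  unfold Spec_print_2
  exact main_eq s
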